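-- pv_equiv track=rewrite | github.com/manudc-blip/astromap-api | build_cities_db_sqlite.py | pick_best_name
-- ===== SOURCE A (Python) =====
-- def pick_best_name(candidates, fallback: str) -> str:
--     if not candidates:
--         return fallback
--
--     cleaned = [
--         c.strip() for c in candidates
--         if c and c.strip() and "," not in c and len(c.strip()) <= 60
--     ]
--
--     if not cleaned:
--         cleaned = [c.strip() for c in candidates if c and c.strip()]
--
--     return min(cleaned, key=lambda s: (len(s), s.lower()))
-- ===== SOURCE B (Python) =====
-- def pick_best_name(candidates, fallback: str) -> str:
--     # Sort-then-scan: rank all non-blank names once by (len, lower) with a stable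
--     # sort, then return the first ranked name passing the strict filters
--     # (no comma in the original, stripped length <= 60); if none passes,
--     # the best-ranked name overall is the answer.
--     if not candidates:
--         return fallback
--     ranked = sorted(((c.strip(), c) for c in candidates if c and c.strip()),
--                     key=lambda p: (len(p[0]), p[0].lower()))
--     for s, c in ranked:
--         if "," not in c and len(s) <= 60:
--             return s
--     return ranked[0][0]
-- ===== Notes on version B (the rewrite author's own statement) =====
-- stated objective: alternative
-- what changed: Replaces A's two filter-comprehensions plus min() by a sort-then-scan: one stable sort of all non-blank (stripped, original) pairs under the (len, lower) key, then a linear scan returning the first ranked name passing the strict filters, falling back to the overall best-ranked name.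
import Mathlib
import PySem

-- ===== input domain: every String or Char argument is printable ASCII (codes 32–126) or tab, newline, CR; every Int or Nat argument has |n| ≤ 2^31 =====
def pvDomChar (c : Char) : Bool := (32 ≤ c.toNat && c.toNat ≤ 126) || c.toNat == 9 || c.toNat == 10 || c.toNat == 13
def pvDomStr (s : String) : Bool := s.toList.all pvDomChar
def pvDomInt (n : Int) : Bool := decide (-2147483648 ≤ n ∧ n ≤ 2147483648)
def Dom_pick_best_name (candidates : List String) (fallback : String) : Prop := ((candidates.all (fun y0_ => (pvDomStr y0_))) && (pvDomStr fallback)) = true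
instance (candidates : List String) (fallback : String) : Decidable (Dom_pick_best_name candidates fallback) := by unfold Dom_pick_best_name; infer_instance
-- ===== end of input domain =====

-- B replaces A's filter-twice-then-min() pipeline by a sort-then-scan over one stable
-- ranking of the non-blank names (alternative algorithm, same result); on the excluded
-- inputs (non-empty list, all elements empty/whitespace) both programs raise.

-- ===== PORT A =====
-- the comprehension condition: c and c.strip() and "," not in c and len(c.strip()) <= 60
def pbnStrictPred (c : String) : Bool :=
  decide (c ≠ "") && decide (PySem.Str.strip c ≠ "") && !(PySem.Str.isIn "," c) &&
    decide (PySem.Str.len (PySem.Str.strip c) ≤ 60)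

-- the relaxed comprehension condition: c and c.strip()
def pbnRelaxPred (c : String) : Bool :=
  decide (c ≠ "") && decide (PySem.Str.strip c ≠ "")

def pick_best_name (candidates : List String) (fallback : String) : String :=
  if candidates = [] then fallback
  else
    let cleaned := (candidates.filter pbnStrictPred).map PySem.Str.strip
    let cleaned2 := if cleaned = [] then (candidates.filter pbnRelaxPred).map PySem.Str.strip else cleaned
    match PySem.List.min2? cleaned2 (fun s => PySem.Str.len s) (fun s => PySem.Str.lower s) with
    | some m => m
    | none => ""   -- min([]) raises ValueError in Python; these inputs are outside Pre_

-- ===== PORT B =====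
-- the scan condition in Source B: "," not in c and len(s) <= 60, on a pair (s, c)
def pbnPairOK (p : String × String) : Bool :=
  !(PySem.Str.isIn "," p.2) && decide (PySem.Str.len p.1 ≤ 60)

def pick_best_name_alt (candidates : List String) (fallback : String) : String :=
  if candidates = [] then fallback
  else
    let ranked := PySem.List.sorted2
      ((candidates.filter pbnRelaxPred).map (fun c => (PySem.Str.strip c, c)))
      (fun p => PySem.Str.len p.1) (fun p => PySem.Str.lower p.1)
    match ranked.find? pbnPairOK with   -- the for-loop returning on first hit
    | some p => p.1
    | none =>
      match PySem.List.pyGet? ranked 0 with   -- ranked[0]: IndexError when empty, outside Pre_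
      | some p => p.1
      | none => ""

-- ===== PRECONDITION & SPEC =====
-- Pre_ excludes exactly the inputs on which A raises ValueError (min of an empty list):
-- a non-empty candidates list whose every element is empty or whitespace-only.
def Pre_pick_best_name (candidates : List String) (fallback : String) : Prop :=
  candidates = [] ∨ (candidates.any (fun c => decide (c ≠ "") && decide (PySem.Str.strip c ≠ ""))) = true
instance (candidates : List String) (fallback : String) : Decidable (Pre_pick_best_name candidates fallback) := by unfold Pre_pick_best_name; infer_instance

def pvWitness_pick_best_name : List String × String := ([" Paris ", "a,b", ""], "X")

def Spec_pick_best_name (candidates : List String) (fallback : String) (out : String) : Prop := out = pick_best_name_alt candidates fallback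
instance (candidates : List String) (fallback : String) (out : String) : Decidable (Spec_pick_best_name candidates fallback out) := by unfold Spec_pick_best_name; infer_instance

-- ===== CLAIM (what is proved, stated in full; the proofs are below) =====
def Claim_equal_pick_best_name : Prop := ∀ (candidates : List String) (fallback : String), Dom_pick_best_name candidates fallback → Pre_pick_best_name candidates fallback → Spec_pick_best_name candidates fallback (pick_best_name candidates fallback)

-- ===== LEMMAS AND PROOFS =====

-- the (len, lower) strict comparison on stripped strings / on (stripped, original) pairs
def pbnSLt (x m : String) : Bool :=
  decide (PySem.Str.len x < PySem.Str.len m) ||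
    (!decide (PySem.Str.len m < PySem.Str.len x) && decide (PySem.Str.lower x < PySem.Str.lower m))

def pbnLt (p q : String × String) : Bool := pbnSLt p.1 q.1

-- one step of min() with key (len, lower) over strings / over pairs
def pbnMStep (acc : Option String) (x : String) : Option String :=
  match acc with
  | none => some x
  | some m => if pbnSLt x m then some x else some m

def pbnPStep (acc : Option (String × String)) (x : String × String) : Option (String × String) :=
  match acc with
  | none => some x
  | some m => if pbnLt x m then some x else some m

theorem pbn_foldl_ext {f g : Option String -> String -> Option String}
    (h : ∀ a x, f a x = g a x) :
    ∀ (xs : List String) (a : Option String), xs.foldl f a = xs.foldl g a := by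
  intro xs
  induction xs with
  | nil => intro a; rfl
  | cons x t ih => intro a; rw [List.foldl_cons, List.foldl_cons, h, ih]

theorem pbn_min2_eq_foldl (xs : List String) :
    PySem.List.min2? xs (fun s => PySem.Str.len s) (fun s => PySem.Str.lower s) =
      xs.foldl pbnMStep none := by
  unfold PySem.List.min2?
  exact pbn_foldl_ext (fun a x => by cases a <;> rfl) xs none

theorem pbn_sorted2_eq (P : List (String × String)) :
    PySem.List.sorted2 P (fun p => PySem.Str.len p.1) (fun p => PySem.Str.lower p.1) =
      P.foldl (fun acc x => PySem.List.insertBy pbnLt x acc) [] := rfl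

-- order facts about pbnLt
theorem pbnSLt_iff (x m : String) : pbnSLt x m = true ↔
    (PySem.Str.len x < PySem.Str.len m ∨
      (PySem.Str.len x = PySem.Str.len m ∧ PySem.Str.lower x < PySem.Str.lower m)) := by
  simp only [pbnSLt, Bool.or_eq_true, Bool.and_eq_true, Bool.not_eq_true', decide_eq_true_eq,
    decide_eq_false_iff_not]
  constructor
  · rintro (h | ⟨hn, hl⟩)
    · exact Or.inl h
    · by_cases hx : PySem.Str.len x < PySem.Str.len m
      · exact Or.inl hx
      · exact Or.inr ⟨le_antisymm (not_lt.mp hn) (not_lt.mp hx), hl⟩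
  · rintro (h | ⟨he, hl⟩)
    · exact Or.inl h
    · exact Or.inr ⟨by rw [he]; exact lt_irrefl _, hl⟩

theorem pbnLt_trans {a b c : String × String} (h1 : pbnLt a b = true) (h2 : pbnLt b c = true) :
    pbnLt a c = true := by
  rw [pbnLt, pbnSLt_iff] at *
  rcases h1 with h1 | ⟨e1, l1⟩ <;> rcases h2 with h2 | ⟨e2, l2⟩
  · exact Or.inl (lt_trans h1 h2)
  · exact Or.inl (e2 ▸ h1)
  · exact Or.inl (e1 ▸ h2)
  · exact Or.inr ⟨e1.trans e2, lt_trans l1 l2⟩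

theorem pbnLt_asymm {a b : String × String} (h : pbnLt a b = true) : pbnLt b a = false := by
  rw [pbnLt, pbnSLt_iff] at h
  rw [pbnLt, Bool.eq_false_iff, Ne, pbnSLt_iff]
  rcases h with h | ⟨e, l⟩
  · rintro (h' | ⟨e', _⟩)
    · exact absurd (lt_trans h h') (lt_irrefl _)
    · exact absurd h (e' ▸ lt_irrefl _)
  · rintro (h' | ⟨_, l'⟩)
    · exact absurd h' (e ▸ lt_irrefl _)
    · exact absurd (lt_trans l l') (lt_irrefl _)

theorem pbnLt_of_lt_of_nlt {x y m : String × String} (h1 : pbnLt x y = true)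
    (h2 : pbnLt m y = false) : pbnLt x m = true := by
  rw [pbnLt, pbnSLt_iff] at h1 ⊢
  rw [pbnLt, Bool.eq_false_iff, Ne, pbnSLt_iff] at h2
  push Not at h2
  obtain ⟨hL, hW⟩ := h2
  have hle : PySem.Str.len y.1 ≤ PySem.Str.len m.1 := hL
  rcases h1 with h1 | ⟨e1, l1⟩
  · rcases eq_or_lt_of_le hle with he | hlt
    · exact Or.inl (he ▸ h1)
    · exact Or.inl (lt_trans h1 hlt)
  · rcases eq_or_lt_of_le hle with he | hlt
    · refine Or.inr ⟨e1.trans he, ?_⟩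
      exact lt_of_lt_of_le l1 (hW he.symm)
    · exact Or.inl (e1 ▸ hlt)

-- find? through inserting a non-matching element
theorem pbn_find?_insertBy_neg (q : String × String → Bool) (x : String × String)
    (hq : q x = false) :
    ∀ S : List (String × String),
      (PySem.List.insertBy pbnLt x S).find? q = S.find? q := by
  intro S
  induction S with
  | nil => simp [PySem.List.insertBy, List.find?, hq]
  | cons y ys ih =>
    rw [PySem.List.insertBy]
    by_cases h : pbnLt x y = true
    · simp [h, List.find?, hq]
    · simp only [Bool.not_eq_true] at h
      simp only [h, Bool.false_eq_true, if_false]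
      cases hy : q y with
      | true => simp [List.find?, hy]
      | false => simp [List.find?, hy, ih]

-- find? through inserting a matching element into a sorted list
theorem pbn_find?_insertBy_pos (q : String × String → Bool) (x : String × String)
    (hq : q x = true) :
    ∀ S : List (String × String), S.Pairwise (fun a b => pbnLt b a = false) →
      (PySem.List.insertBy pbnLt x S).find? q =
        (match S.find? q with
         | none => some x
         | some m => if pbnLt x m then some x else some m) := by
  intro S
  induction S with
  | nil => intro _; simp [PySem.List.insertBy, List.find?, hq]
  | cons y ys ih =>
    intro hp
    rw [List.pairwise_cons] at hp
    rw [PySem.List.insertBy]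
    by_cases h : pbnLt x y = true
    · simp only [h, if_true]
      cases hy : q y with
      | true => simp [List.find?, hq, hy, h]
      | false =>
        simp only [List.find?, hq, hy]
        cases hm : ys.find? q with
        | none => simp
        | some m =>
          have hmem : m ∈ ys := List.mem_of_find?_eq_some hm
          have : pbnLt x m = true := pbnLt_of_lt_of_nlt h (hp.1 m hmem)
          simp [this]
    · simp only [Bool.not_eq_true] at h
      simp only [h, Bool.false_eq_true, if_false]
      cases hy : q y with
      | true => simp [List.find?, hy, h]
      | false => simp [List.find?, hy, ih hp.2]

-- insertBy preserves sortedness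
theorem pbn_insertBy_pairwise (x : String × String) :
    ∀ S : List (String × String), S.Pairwise (fun a b => pbnLt b a = false) →
      (PySem.List.insertBy pbnLt x S).Pairwise (fun a b => pbnLt b a = false) := by
  intro S
  induction S with
  | nil => intro _; simp [PySem.List.insertBy]
  | cons y ys ih =>
    intro hp
    rw [List.pairwise_cons] at hp
    rw [PySem.List.insertBy]
    by_cases h : pbnLt x y = true
    · simp only [h, if_true]
      rw [List.pairwise_cons]
      refine ⟨?_, List.pairwise_cons.mpr hp⟩
      intro z hz
      rcases List.mem_cons.mp hz with rfl | hz'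
      · exact pbnLt_asymm h
      · by_contra hc
        simp only [Bool.not_eq_false] at hc
        exact absurd (hp.1 z hz') (by simp [pbnLt_trans hc h])
    · simp only [Bool.not_eq_true] at h
      simp only [h, Bool.false_eq_true, if_false]
      rw [List.pairwise_cons]
      refine ⟨?_, ih hp.2⟩
      intro z hz
      rcases (PySem.List.mem_insertBy pbnLt x z ys).mp hz with rfl | hz'
      · exact h
      · exact hp.1 z hz'

theorem pbn_sorted_pairwise (P : List (String × String)) :
    ((P.foldl (fun acc x => PySem.List.insertBy pbnLt x acc) [])).Pairwise
      (fun a b => pbnLt b a = false) := by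
  induction P using List.reverseRecOn with
  | nil => simp
  | append_singleton P x ih =>
    rw [List.foldl_append, List.foldl_cons, List.foldl_nil]
    exact pbn_insertBy_pairwise x _ ih

-- first matching element of the stable ranking = running min over the matching elements
theorem pbn_find?_sorted (q : String × String → Bool) (P : List (String × String)) :
    ((P.foldl (fun acc x => PySem.List.insertBy pbnLt x acc) [])).find? q =
      (P.filter q).foldl pbnPStep none := by
  induction P using List.reverseRecOn with
  | nil => rfl
  | append_singleton P x ih =>
    rw [List.foldl_append, List.foldl_cons, List.foldl_nil, List.filter_append,
      List.foldl_append]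
    cases hq : q x with
    | false =>
      rw [pbn_find?_insertBy_neg q x hq, ih]
      simp [hq]
    | true =>
      rw [pbn_find?_insertBy_pos q x hq _ (pbn_sorted_pairwise P), ih]
      simp only [List.filter_cons, hq, if_true, List.filter_nil, List.foldl_cons, List.foldl_nil]
      cases (P.filter q).foldl pbnPStep none with
      | none => rfl
      | some m => rfl

-- the pair-level running min projects to the string-level running min
theorem pbn_foldl_pstep_map :
    ∀ (l : List (String × String)) (acc : Option (String × String)),
      (l.foldl pbnPStep acc).map Prod.fst =
        (l.map Prod.fst).foldl pbnMStep (acc.map Prod.fst) := by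
  intro l
  induction l with
  | nil => intro acc; rfl
  | cons x t ih =>
    intro acc
    rw [List.map_cons, List.foldl_cons, List.foldl_cons, ih]
    congr 1
    cases acc with
    | none => rfl
    | some m =>
      simp only [pbnPStep, pbnMStep, Option.map_some, pbnLt]
      by_cases h : pbnSLt x.1 m.1 = true <;> simp [h]

theorem pbn_foldl_some (xs : List String) (m : String) :
    ∃ r, xs.foldl pbnMStep (some m) = some r := by
  induction xs generalizing m with
  | nil => exact ⟨m, rfl⟩
  | cons x t ih =>
    simp only [List.foldl_cons, pbnMStep]
    split
    · exact ih x
    · exact ih m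

-- the strict comprehension = the relaxed one refiltered by the pair condition
theorem pbn_pred_split (c : String) :
    (pbnRelaxPred c && pbnPairOK (PySem.Str.strip c, c)) = pbnStrictPred c := by
  simp [pbnRelaxPred, pbnPairOK, pbnStrictPred, Bool.and_assoc]

-- ===== VERDICT (by name: the statement is the Claim_ definition above) =====
theorem pick_best_name_spec : Claim_equal_pick_best_name := by
  intro candidates fallback _ hpre
  show pick_best_name candidates fallback = pick_best_name_alt candidates fallback
  by_cases hnil : candidates = []
  · subst hnil; rfl
  · have hrel : (candidates.any (fun c => decide (c ≠ "") && decide (PySem.Str.strip c ≠ ""))) = true := by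
      rcases hpre with h | h
      · exact absurd h hnil
      · exact h
    -- list bookkeeping: the two comprehensions of A, seen through B's pair list
    have hfilt : ((candidates.filter pbnRelaxPred).map (fun c => (PySem.Str.strip c, c))).filter pbnPairOK
        = (candidates.filter pbnStrictPred).map (fun c => (PySem.Str.strip c, c)) := by
      rw [List.filter_map, List.filter_filter]
      congr 1
      refine List.filter_congr (fun a _ => ?_)
      rw [← pbn_pred_split a, Bool.and_comm]
      rfl
    have hfst : (((candidates.filter pbnRelaxPred).map (fun c => (PySem.Str.strip c, c))).filter pbnPairOK).map Prod.fst
        = (candidates.filter pbnStrictPred).map PySem.Str.strip := by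
      rw [hfilt, List.map_map]; rfl
    have hPfst : ((candidates.filter pbnRelaxPred).map (fun c => (PySem.Str.strip c, c))).map Prod.fst
        = (candidates.filter pbnRelaxPred).map PySem.Str.strip := by
      rw [List.map_map]; rfl
    simp only [pick_best_name, pick_best_name_alt, if_neg hnil]
    rw [pbn_sorted2_eq, pbn_find?_sorted, pbn_min2_eq_foldl]
    by_cases hS : (candidates.filter pbnStrictPred).map PySem.Str.strip = []
    · -- strict list empty: A takes the relaxed min, B falls through to ranked[0]
      rw [if_pos hS]
      -- B's find? returns none
      have hnoneB : (((candidates.filter pbnRelaxPred).map (fun c => (PySem.Str.strip c, c))).filter pbnPairOK).foldl pbnPStep none = none := by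
        have := pbn_foldl_pstep_map (((candidates.filter pbnRelaxPred).map (fun c => (PySem.Str.strip c, c))).filter pbnPairOK) none
        rw [hfst, hS] at this
        simp only [List.foldl_nil, Option.map_none, Option.map_eq_none_iff] at this
        exact this
      rw [hnoneB]
      -- the relaxed list is non-empty and has a running min m
      have hRne : (candidates.filter pbnRelaxPred).map PySem.Str.strip ≠ [] := by
        rcases List.any_eq_true.mp hrel with ⟨c, hmem, hp⟩
        have hcf : c ∈ candidates.filter pbnRelaxPred :=
          List.mem_filter.mpr ⟨hmem, by simpa [pbnRelaxPred] using hp⟩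
        intro hcon
        rw [List.map_eq_nil_iff.mp hcon] at hcf
        simp at hcf
      obtain ⟨m, hm⟩ : ∃ m, ((candidates.filter pbnRelaxPred).map PySem.Str.strip).foldl pbnMStep none = some m := by
        cases hRe : (candidates.filter pbnRelaxPred).map PySem.Str.strip with
        | nil => exact absurd hRe hRne
        | cons r t =>
          rw [List.foldl_cons]
          exact pbn_foldl_some t r
      rw [hm]
      -- the head of the ranking is that same min
      have htrue := pbn_find?_sorted (fun _ => true) ((candidates.filter pbnRelaxPred).map (fun c => (PySem.Str.strip c, c)))
      rw [List.filter_true] at htrue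
      have hmap := pbn_foldl_pstep_map ((candidates.filter pbnRelaxPred).map (fun c => (PySem.Str.strip c, c))) none
      rw [hPfst] at hmap
      simp only [Option.map_none] at hmap
      rw [hm] at hmap
      obtain ⟨p, hp, hpm⟩ : ∃ p, ((candidates.filter pbnRelaxPred).map (fun c => (PySem.Str.strip c, c))).foldl pbnPStep none = some p ∧ p.1 = m := by
        cases ho : ((candidates.filter pbnRelaxPred).map (fun c => (PySem.Str.strip c, c))).foldl pbnPStep none with
        | none => rw [ho] at hmap; simp at hmap
        | some p => rw [ho] at hmap; exact ⟨p, rfl, by simpa using hmap⟩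
      rw [hp] at htrue
      cases hrk : ((candidates.filter pbnRelaxPred).map (fun c => (PySem.Str.strip c, c))).foldl (fun acc x => PySem.List.insertBy pbnLt x acc) [] with
      | nil => rw [hrk] at htrue; simp [List.find?] at htrue
      | cons r t =>
        rw [hrk] at htrue
        simp only [List.find?] at htrue
        have hr : r = p := by simpa using htrue
        have : PySem.List.pyGet? (r :: t) 0 = some r := by
          simp [PySem.List.pyGet?, PySem.List.pyIdx?]
        rw [this, hr]
        simp [hpm]
    · -- strict list non-empty: A's min over it = B's first strict hit in the ranking
      rw [if_neg hS]
      have hmap := pbn_foldl_pstep_map (((candidates.filter pbnRelaxPred).map (fun c => (PySem.Str.strip c, c))).filter pbnPairOK) none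
      rw [hfst] at hmap
      simp only [Option.map_none] at hmap
      obtain ⟨m, hm⟩ : ∃ m, ((candidates.filter pbnStrictPred).map PySem.Str.strip).foldl pbnMStep none = some m := by
        cases hRe : (candidates.filter pbnStrictPred).map PySem.Str.strip with
        | nil => exact absurd hRe hS
        | cons r t =>
          rw [List.foldl_cons]
          exact pbn_foldl_some t r
      rw [hm]
      rw [hm] at hmap
      cases ho : (((candidates.filter pbnRelaxPred).map (fun c => (PySem.Str.strip c, c))).filter pbnPairOK).foldl pbnPStep none with
      | none => rw [ho] at hmap; simp at hmap
      | some p =>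
        rw [ho] at hmap
        simpa using hmap.symm
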